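-- pv_equiv track=rewrite | github.com/alrivero/TATER | datasets/VOCASET_dataset.py | find_exhaustive_neighbor
-- ===== SOURCE A (Python) =====
-- def find_exhaustive_neighbor(index, available_indices):
--     """Finds the closest valid left/right neighbor, checking exhaustively if necessary."""
--     if index in available_indices:
--         return index  # Direct hit
--
--     # If no valid indices exist, return None (handle it safely later)
--     if not available_indices:
--         return None
--
--     # Search outward for the closest available index
--     offset = 1
--     while True:
--         left = index - offset
--         right = index + offset
--
--         if left in available_indices:
--             return left
--         if right in available_indices:
--             return right
--
--         # If we exceed the available range, return the closest bound
--         if left < min(available_indices) and right > max(available_indices):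
--             return min(available_indices) if abs(left - index) < abs(right - index) else max(available_indices)
--
--         # Prevent infinite loops by capping the search range
--         if offset > (max(available_indices) - min(available_indices)):
--             return min(available_indices)  # Return smallest valid index as fallback
--
--         offset += 1  # Expand search outward
-- ===== SOURCE B (Python) =====
-- def find_exhaustive_neighbor(index, available_indices):
--     """One linear pass: keep the element minimizing (abs(x - index), x)."""
--     best = None
--     for x in available_indices:
--         if best is None or abs(x - index) < abs(best - index) or \
--            (abs(x - index) == abs(best - index) and x < best):
--             best = x
--     return best
-- ===== Notes on version B (the rewrite author's own statement) =====
-- stated objective: faster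
-- what changed: Replaces the outward ring search (each step doing 'in'/min/max scans over the whole list) with a single linear pass keeping the element minimizing (abs(x-index), x).
-- intended difference: When the list has at least two distinct values and index > max + (max - min) + 1, A's loop cap fires and it returns min(available_indices) as an arbitrary fallback, while B returns max(available_indices), the genuinely closest element, which is what the function's docstring ('closest valid neighbor') intends. — e.g. on find_exhaustive_neighbor(10, [0, 1]): A returns some 0, B returns some 1
import Mathlib
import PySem

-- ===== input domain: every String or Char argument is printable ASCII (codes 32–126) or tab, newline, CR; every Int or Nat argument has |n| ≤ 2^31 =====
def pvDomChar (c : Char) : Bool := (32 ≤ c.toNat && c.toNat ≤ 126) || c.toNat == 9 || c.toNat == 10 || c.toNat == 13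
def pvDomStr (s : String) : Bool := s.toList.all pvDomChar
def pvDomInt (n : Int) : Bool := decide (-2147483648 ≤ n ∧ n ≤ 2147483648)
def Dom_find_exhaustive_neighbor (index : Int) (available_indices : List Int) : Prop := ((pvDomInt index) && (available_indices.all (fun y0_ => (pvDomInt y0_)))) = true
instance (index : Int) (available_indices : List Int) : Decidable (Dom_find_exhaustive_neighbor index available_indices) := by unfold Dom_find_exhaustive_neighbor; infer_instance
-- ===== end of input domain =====

-- B replaces A's outward ring search with one linear pass keeping the element
-- minimizing (|x - index|, x); A's "cap" fallback returns min(list) when index lies far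
-- beyond max, where the closest element is max — stated as the intended difference D_.


-- ===== PORT A =====
-- The while-loop; mn/mx (min/max of the unchanged list) are hoisted out of the loop for
-- termination — Python recomputes min/max each iteration over the same list, same values;
-- 'left'/'right' are inlined as index - offset / index + offset.
def faLoop (index : Int) (l : List Int) (mn mx : Int) (offset : Int) : Option Int :=
  if index - offset ∈ l then some (index - offset)
  else if index + offset ∈ l then some (index + offset)
  else if index - offset < mn ∧ index + offset > mx then
    some (if |index - offset - index| < |index + offset - index| then mn else mx)
  else if offset > mx - mn then some mn
  else faLoop index l mn mx (offset + 1)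
termination_by (mx - mn + 1 - offset).toNat
decreasing_by omega

def find_exhaustive_neighbor (index : Int) (available_indices : List Int) : Option Int :=
  if index ∈ available_indices then some index
  else if available_indices = [] then none
  else
    match PySem.List.min? available_indices (fun x => x),
          PySem.List.max? available_indices (fun x => x) with
    | some mn, some mx => faLoop index available_indices mn mx 1
    | _, _ => none  -- unreachable: the list is nonempty

-- ===== PORT B =====
def fbStep (index : Int) (best : Option Int) (x : Int) : Option Int :=
  match best with
  | none => some x
  | some b =>
      if |x - index| < |b - index| ∨ (|x - index| = |b - index| ∧ x < b) then some x
      else some b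

def find_exhaustive_neighbor_alt (index : Int) (available_indices : List Int) : Option Int :=
  available_indices.foldl (fbStep index) none

-- ===== PRECONDITION & SPEC =====
-- When the list has at least two distinct values and index > max + (max - min) + 1, A's loop
-- cap fires and returns min(list) as a fallback while B returns max(list), the genuinely
-- closest element, which is what the docstring ('closest valid neighbor') intends.
def D_find_exhaustive_neighbor (index : Int) (available_indices : List Int) : Prop :=
  available_indices ≠ [] ∧
  (PySem.List.min? available_indices (fun x => x)).getD 0 <
    (PySem.List.max? available_indices (fun x => x)).getD 0 ∧
  index - (PySem.List.max? available_indices (fun x => x)).getD 0 >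
    (PySem.List.max? available_indices (fun x => x)).getD 0 -
      (PySem.List.min? available_indices (fun x => x)).getD 0 + 1
instance (index : Int) (available_indices : List Int) : Decidable (D_find_exhaustive_neighbor index available_indices) := by unfold D_find_exhaustive_neighbor; infer_instance

def Spec_find_exhaustive_neighbor (index : Int) (available_indices : List Int) (out : Option Int) : Prop := ¬ D_find_exhaustive_neighbor index available_indices → out = find_exhaustive_neighbor_alt index available_indices
instance (index : Int) (available_indices : List Int) (out : Option Int) : Decidable (Spec_find_exhaustive_neighbor index available_indices out) := by unfold Spec_find_exhaustive_neighbor; infer_instance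

def pvDiffWitness_find_exhaustive_neighbor : Int × List Int := (10, [0, 1])
def pvDiffWitnessOut_find_exhaustive_neighbor : (Option Int) × (Option Int) := (some 0, some 1)

-- ===== CLAIM (what is proved, stated in full; the proofs are below) =====
def Claim_unchanged_find_exhaustive_neighbor : Prop := ∀ (index : Int) (available_indices : List Int), Dom_find_exhaustive_neighbor index available_indices → Spec_find_exhaustive_neighbor index available_indices (find_exhaustive_neighbor index available_indices)
def Claim_changed_find_exhaustive_neighbor : Prop := Dom_find_exhaustive_neighbor (pvDiffWitness_find_exhaustive_neighbor.1) (pvDiffWitness_find_exhaustive_neighbor.2) ∧ D_find_exhaustive_neighbor (pvDiffWitness_find_exhaustive_neighbor.1) (pvDiffWitness_find_exhaustive_neighbor.2) ∧ find_exhaustive_neighbor (pvDiffWitness_find_exhaustive_neighbor.1) (pvDiffWitness_find_exhaustive_neighbor.2) = pvDiffWitnessOut_find_exhaustive_neighbor.1 ∧ find_exhaustive_neighbor_alt (pvDiffWitness_find_exhaustive_neighbor.1) (pvDiffWitness_find_exhaustive_neighbor.2) = pvDiffWitnessOut_find_exhaustive_neighbor.2 ∧ pvDiffWitnessOut_find_exhaustive_neighbor.1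 ≠ pvDiffWitnessOut_find_exhaustive_neighbor.2
def Claim_exact_find_exhaustive_neighbor : Prop := ∀ (index : Int) (available_indices : List Int), Dom_find_exhaustive_neighbor index available_indices → D_find_exhaustive_neighbor index available_indices → find_exhaustive_neighbor index available_indices ≠ find_exhaustive_neighbor_alt index available_indices

-- ===== LEMMAS AND PROOFS =====

/-- The element B selects: a member minimizing the key (|·-i|, ·) lexicographically. -/
def Nearest (i : Int) (l : List Int) (m : Int) : Prop :=
  m ∈ l ∧ ∀ y ∈ l, |m - i| < |y - i| ∨ (|m - i| = |y - i| ∧ m ≤ y)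

theorem nearest_unique {i : Int} {l : List Int} {m m' : Int}
    (h : Nearest i l m) (h' : Nearest i l m') : m = m' := by
  rcases h with ⟨hm, hall⟩
  rcases h' with ⟨hm', hall'⟩
  rcases hall m' hm' with h1 | ⟨h1, h2⟩ <;> rcases hall' m hm with h3 | ⟨h3, h4⟩ <;> omega

theorem foldl_fbStep_spec (i : Int) (l : List Int) (b : Int) :
    ∃ m, List.foldl (fbStep i) (some b) l = some m ∧ m ∈ b :: l ∧
      ∀ y ∈ b :: l, |m - i| < |y - i| ∨ (|m - i| = |y - i| ∧ m ≤ y) := by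
  induction l generalizing b with
  | nil =>
    refine ⟨b, rfl, by simp, ?_⟩
    intro y hy
    have : y = b := by simpa using hy
    subst this; omega
  | cons x t ih =>
    simp only [List.foldl_cons]
    by_cases hc : |x - i| < |b - i| ∨ (|x - i| = |b - i| ∧ x < b)
    · have hstep : fbStep i (some b) x = some x := by simp [fbStep, hc]
      rw [hstep]
      obtain ⟨m, hm, hmem, hall⟩ := ih x
      refine ⟨m, hm, ?_, ?_⟩
      · rcases List.mem_cons.mp hmem with h | h <;> simp [h]
      · intro y hy
        rcases List.mem_cons.mp hy with hy | hy
        · have := hall x (by simp); subst hy; omega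
        · rcases List.mem_cons.mp hy with hy | hy
          · subst hy; exact hall y (by simp)
          · exact hall y (by simp [hy])
    · have hstep : fbStep i (some b) x = some b := by simp [fbStep, hc]
      rw [hstep]
      obtain ⟨m, hm, hmem, hall⟩ := ih b
      refine ⟨m, hm, ?_, ?_⟩
      · rcases List.mem_cons.mp hmem with h | h <;> simp [h]
      · intro y hy
        rcases List.mem_cons.mp hy with hy | hy
        · subst hy; exact hall y (by simp)
        · rcases List.mem_cons.mp hy with hy | hy
          · have := hall b (by simp)
            simp only [not_or, not_and, not_lt] at hc
            subst hy; omega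
          · exact hall y (by simp [hy])

theorem alt_nearest (i : Int) (l : List Int) (hne : l ≠ []) :
    ∃ m, find_exhaustive_neighbor_alt i l = some m ∧ Nearest i l m := by
  cases l with
  | nil => exact absurd rfl hne
  | cons x t =>
    have hstep : fbStep i none x = some x := by simp [fbStep]
    obtain ⟨m, hm, hmem, hall⟩ := foldl_fbStep_spec i t x
    exact ⟨m, by simpa [find_exhaustive_neighbor_alt, hstep] using hm, hmem, hall⟩

theorem alt_eq_of_nearest {i : Int} {l : List Int} {m : Int}
    (h : Nearest i l m) : find_exhaustive_neighbor_alt i l = some m := by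
  have hne : l ≠ [] := by intro he; rw [he] at h; exact absurd h.1 (by simp)
  obtain ⟨m', hm', hn'⟩ := alt_nearest i l hne
  rw [hm', nearest_unique hn' h]

/-- Core analysis of A's loop under its reachability invariant. -/
theorem faLoop_spec (i : Int) (l : List Int) (mn mx : Int)
    (hmn : mn ∈ l) (hmx : mx ∈ l)
    (hmnle : ∀ y ∈ l, mn ≤ y) (hmxge : ∀ y ∈ l, y ≤ mx) :
    ∀ (n : Nat) (offset : Int), (mx - mn + 1 - offset).toNat = n → 1 ≤ offset →
      (∀ y ∈ l, offset ≤ |y - i|) →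
      ((mn < mx ∧ i - mx > mx - mn + 1) → offset ≤ mx - mn + 1) →
      (((mn < mx ∧ i - mx > mx - mn + 1) → faLoop i l mn mx offset = some mn) ∧
       (¬(mn < mx ∧ i - mx > mx - mn + 1) →
          ∃ m, faLoop i l mn mx offset = some m ∧ Nearest i l m)) := by
  intro n
  induction n using Nat.strong_induction_on with
  | _ n ih =>
    intro offset hn hoff hinv hcap
    rw [faLoop]
    split_ifs with h1 h2 h3 h3' h4
    · -- left hit
      constructor
      · intro hD
        have hc := hcap hD
        have hb := hmxge _ h1
        exact absurd hb (by omega)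
      · intro _
        refine ⟨i - offset, rfl, h1, ?_⟩
        intro y hy
        have hA := hinv y hy
        rcases abs_cases (i - offset - i) with ⟨hd1, _⟩ | ⟨hd1, _⟩ <;>
          rcases abs_cases (y - i) with ⟨hd2, _⟩ | ⟨hd2, _⟩ <;> omega
    · -- right hit, left missed
      constructor
      · intro hD
        have hb := hmxge _ h2
        exact absurd hb (by omega)
      · intro _
        refine ⟨i + offset, rfl, h2, ?_⟩
        intro y hy
        have hA := hinv y hy
        have hne1 : y ≠ i - offset := fun he => h1 (he ▸ hy)
        rcases abs_cases (i + offset - i) with ⟨hd1, _⟩ | ⟨hd1, _⟩ <;>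
          rcases abs_cases (y - i) with ⟨hd2, _⟩ | ⟨hd2, _⟩ <;> omega
    · -- "exceeds both bounds": unreachable under the invariant
      exfalso
      have hA := hinv mn hmn
      have hB := hmnle mx hmx
      rcases abs_cases (mn - i) with ⟨hd, _⟩ | ⟨hd, _⟩ <;> omega
    · -- "exceeds both bounds": unreachable under the invariant
      exfalso
      have hA := hinv mn hmn
      have hB := hmnle mx hmx
      rcases abs_cases (mn - i) with ⟨hd, _⟩ | ⟨hd, _⟩ <;> omega
    · -- the cap: returns mn
      refine ⟨fun _ => rfl, ?_⟩
      intro hD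
      have hAmn := hinv mn hmn
      have hAmx := hinv mx hmx
      have hBm := hmnle mx hmx
      refine ⟨mn, rfl, ?_⟩
      by_cases hcase : mn = mx
      · -- single distinct value: mn is trivially nearest
        refine ⟨hmn, ?_⟩
        intro y hy
        have hy1 := hmnle y hy
        have hy2 := hmxge y hy
        have : y = mn := by omega
        subst this; right; exact ⟨rfl, le_refl _⟩
      · by_cases hlo : i < mn
        · -- index left of all elements: mn is nearest
          refine ⟨hmn, ?_⟩
          intro y hy
          have hy1 := hmnle y hy
          rcases abs_cases (mn - i) with ⟨hd1, _⟩ | ⟨hd1, _⟩ <;>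
            rcases abs_cases (y - i) with ⟨hd2, _⟩ | ⟨hd2, _⟩ <;> omega
        · exfalso
          by_cases hhi : i ≤ mx
          · -- inside the range: mn would be within mx - mn < offset, contradiction
            rcases abs_cases (mn - i) with ⟨hd, _⟩ | ⟨hd, _⟩ <;> omega
          · -- right of the range: then D holds, contradicting hD
            have hne1 : i - offset ≠ mx := fun he => h1 (he ▸ hmx)
            rcases abs_cases (mx - i) with ⟨hd, _⟩ | ⟨hd, _⟩ <;>
              exact hD ⟨by omega, by omega⟩
    · -- recurse with offset + 1
      apply ih ((mx - mn + 1 - (offset + 1)).toNat) (by omega) (offset + 1) rfl (by omega) ?_ (by omega)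
      intro y hy
      have hA := hinv y hy
      have hne1 : y ≠ i - offset := fun he => h1 (he ▸ hy)
      have hne2 : y ≠ i + offset := fun he => h2 (he ▸ hy)
      rcases abs_cases (y - i) with ⟨hd, _⟩ | ⟨hd, _⟩ <;> omega

theorem min_max_some {l : List Int} (hne : l ≠ []) :
    ∃ mn mx, PySem.List.min? l (fun x => x) = some mn ∧
      PySem.List.max? l (fun x => x) = some mx ∧
      mn ∈ l ∧ mx ∈ l ∧ (∀ y ∈ l, mn ≤ y) ∧ (∀ y ∈ l, y ≤ mx) := by
  obtain ⟨mn, hmn⟩ := Option.ne_none_iff_exists'.mp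
    (fun h => hne ((PySem.List.min?_eq_none_iff l (fun x : Int => x)).mp h))
  obtain ⟨mx, hmx⟩ := Option.ne_none_iff_exists'.mp
    (fun h => hne ((PySem.List.max?_eq_none_iff l (fun x : Int => x)).mp h))
  exact ⟨mn, mx, hmn, hmx, PySem.List.min?_mem hmn, PySem.List.max?_mem hmx,
    PySem.List.min?_isMin hmn, PySem.List.max?_isMax hmx⟩

theorem faLoop_start (i : Int) (l : List Int) (mn mx : Int)
    (hmn : mn ∈ l) (hmx : mx ∈ l)
    (hmnle : ∀ y ∈ l, mn ≤ y) (hmxge : ∀ y ∈ l, y ≤ mx) (hni : i ∉ l) :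
    ((mn < mx ∧ i - mx > mx - mn + 1) → faLoop i l mn mx 1 = some mn) ∧
    (¬(mn < mx ∧ i - mx > mx - mn + 1) →
        ∃ m, faLoop i l mn mx 1 = some m ∧ Nearest i l m) := by
  apply faLoop_spec i l mn mx hmn hmx hmnle hmxge _ 1 rfl (by norm_num) ?_ ?_
  · intro y hy
    have hne : y ≠ i := fun he => hni (he ▸ hy)
    rcases abs_cases (y - i) with ⟨hd, _⟩ | ⟨hd, _⟩ <;> omega
  · intro hD
    have := hmnle mx hmx
    omega

theorem D_unfolded {i : Int} {l : List Int} {mn mx : Int}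
    (hmn : PySem.List.min? l (fun x => x) = some mn)
    (hmx : PySem.List.max? l (fun x => x) = some mx) (hne : l ≠ []) :
    D_find_exhaustive_neighbor i l ↔ (mn < mx ∧ i - mx > mx - mn + 1) := by
  unfold D_find_exhaustive_neighbor
  rw [hmn, hmx]
  simp [hne]

theorem find_eq_alt (i : Int) (l : List Int)
    (hD : ¬ D_find_exhaustive_neighbor i l) :
    find_exhaustive_neighbor i l = find_exhaustive_neighbor_alt i l := by
  unfold find_exhaustive_neighbor
  by_cases hmem : i ∈ l
  · rw [if_pos hmem]
    refine (alt_eq_of_nearest ⟨hmem, ?_⟩).symm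
    intro y hy
    have h0 : |i - i| = (0 : Int) := by simp
    by_cases hyi : y = i
    · subst hyi; right; exact ⟨rfl, le_refl _⟩
    · left
      rcases abs_cases (y - i) with ⟨hd, _⟩ | ⟨hd, _⟩ <;> omega
  · rw [if_neg hmem]
    by_cases hne : l = []
    · subst hne; simp [find_exhaustive_neighbor_alt]
    · rw [if_neg hne]
      obtain ⟨mn, mx, hmn, hmx, hmnm, hmxm, hmnle, hmxge⟩ := min_max_some hne
      rw [hmn, hmx]
      dsimp only
      have hD' : ¬(mn < mx ∧ i - mx > mx - mn + 1) :=
        fun h => hD ((D_unfolded hmn hmx hne).mpr h)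
      obtain ⟨m, hm, hnear⟩ := (faLoop_start i l mn mx hmnm hmxm hmnle hmxge hmem).2 hD'
      rw [hm, alt_eq_of_nearest hnear]

-- ===== VERDICT (by name: the statement is the Claim_ definition above) =====
theorem find_exhaustive_neighbor_spec : Claim_unchanged_find_exhaustive_neighbor := by
  intro i l _ hD
  exact find_eq_alt i l hD

theorem find_exhaustive_neighbor_changed : Claim_changed_find_exhaustive_neighbor := by
  unfold Claim_changed_find_exhaustive_neighbor
  refine ⟨by decide, by decide, ?_, by decide, by decide⟩
  have h := (faLoop_start 10 [0, 1] 0 1 (by decide) (by decide)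
      (by decide) (by decide) (by decide)).1 (by decide)
  simpa [find_exhaustive_neighbor, pvDiffWitness_find_exhaustive_neighbor,
    pvDiffWitnessOut_find_exhaustive_neighbor, PySem.List.min?, PySem.List.max?] using h

theorem find_exhaustive_neighbor_tight : Claim_exact_find_exhaustive_neighbor := by
  intro i l _ hD
  have hne : l ≠ [] := hD.1
  obtain ⟨mn, mx, hmn, hmx, hmnm, hmxm, hmnle, hmxge⟩ := min_max_some hne
  have hD' : mn < mx ∧ i - mx > mx - mn + 1 := (D_unfolded hmn hmx hne).mp hD
  have hni : i ∉ l := fun h => by have := hmxge i h; omega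
  have hA : find_exhaustive_neighbor i l = some mn := by
    unfold find_exhaustive_neighbor
    rw [if_neg hni, if_neg hne, hmn, hmx]
    dsimp only
    exact (faLoop_start i l mn mx hmnm hmxm hmnle hmxge hni).1 hD'
  have hB : find_exhaustive_neighbor_alt i l = some mx := by
    apply alt_eq_of_nearest
    refine ⟨hmxm, ?_⟩
    intro y hy
    have h1 := hmxge y hy
    by_cases hym : y = mx
    · subst hym; right; exact ⟨rfl, le_refl _⟩
    · left
      rcases abs_cases (mx - i) with ⟨hd1, _⟩ | ⟨hd1, _⟩ <;>
        rcases abs_cases (y - i) with ⟨hd2, _⟩ | ⟨hd2, _⟩ <;> omega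
  rw [hA, hB]
  intro h
  exact absurd (Option.some.inj h) (by omega)
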